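-- pv_equiv track=rewrite | github.com/thekrishpatel/Stocksense | stock-predictor/src/app.py | extract_stock_symbol_from_title
-- ===== SOURCE A (Python) =====
-- def extract_stock_symbol_from_title(title, mappings):
--     """Extract stock symbols from the title using company to symbol mappings."""
--     suffixes = ['limited', 'ltd', 'corp', 'inc', 'llc']
--     for company_name, symbol in mappings.items():
--         for suffix in suffixes:
--             company_name = company_name.replace(suffix, '').strip()
--         if company_name in title:
--             return symbol
--     return None
-- ===== SOURCE B (Python) =====
-- def extract_stock_symbol_from_title(title, mappings):
--     """Extract stock symbols from the title using company to symbol mappings."""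
--     suffixes = ['limited', 'ltd', 'corp', 'inc', 'llc']
--
--     def clean(name):
--         for suffix in suffixes:
--             name = name.replace(suffix, '').strip()
--         return name
--
--     cleaned = [(clean(name), symbol) for name, symbol in mappings.items()]
--     # index the title once: every substring whose length matches some cleaned name
--     lengths = {len(name) for name, _ in cleaned}
--     substrings = {title[i:i + n] for n in lengths for i in range(len(title) - n + 1)}
--     return next((symbol for name, symbol in cleaned if name in substrings), None)
-- ===== Notes on version B (the rewrite author's own statement) =====
-- stated objective: alternative
-- what changed: B indexes the title once into a set of its substrings of the relevant lengths and then answers each mapping's containment test by a hash lookup, instead of A's per-mapping substring scan of the title.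
import Mathlib
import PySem

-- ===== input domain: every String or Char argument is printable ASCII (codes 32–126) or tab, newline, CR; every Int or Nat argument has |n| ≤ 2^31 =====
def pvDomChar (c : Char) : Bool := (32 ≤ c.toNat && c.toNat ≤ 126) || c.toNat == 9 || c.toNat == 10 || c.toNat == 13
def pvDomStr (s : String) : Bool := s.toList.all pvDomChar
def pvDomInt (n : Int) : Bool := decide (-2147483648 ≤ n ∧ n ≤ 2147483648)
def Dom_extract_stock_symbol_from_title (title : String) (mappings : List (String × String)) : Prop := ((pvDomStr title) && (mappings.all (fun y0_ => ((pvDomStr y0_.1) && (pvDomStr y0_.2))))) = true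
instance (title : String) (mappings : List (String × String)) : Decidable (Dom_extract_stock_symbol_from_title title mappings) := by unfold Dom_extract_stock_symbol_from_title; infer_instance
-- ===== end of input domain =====

-- B indexes the title once into a set of its substrings of the relevant lengths and answers
-- each mapping's containment test by a set lookup (objective: alternative algorithm).
-- Both Pythons clean a company name with the same suffix-strip loop; ported once here.
def pvClean (name : String) : String :=
  ["limited", "ltd", "corp", "inc", "llc"].foldl
    (fun n suffix => PySem.Str.strip (PySem.Str.replace n suffix "")) name

-- ===== PORT A =====
-- for company_name, symbol in mappings.items(): if cleaned in title: return symbol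
def pvGoA (title : String) : List (String × String) → Option String
  | [] => none
  | (company_name, symbol) :: rest =>
    if PySem.Str.isIn (pvClean company_name) title then some symbol
    else pvGoA title rest

def extract_stock_symbol_from_title (title : String) (mappings : List (String × String)) : Option String :=
  pvGoA title (PySem.Dict.ofList mappings).items

-- ===== PORT B =====
-- lengths = {len(name) for name, _ in cleaned}  (len : Int)
def pvLengths (cleaned : List (String × String)) : PySem.Set Int :=
  PySem.Set.ofList (cleaned.map (fun p => PySem.Str.len p.1))

-- substrings = {title[i:i+n] for n in lengths for i in range(len(title) - n + 1)}
-- (a Set is consumed only to build another Set / for membership — order-independent)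
def pvSubstrings (t : List Char) (lengths : PySem.Set Int) : PySem.Set (List Char) :=
  PySem.Set.ofList (lengths.flatMap (fun n =>
    (PySem.List.pyRange 0 ((t.length : Int) - n + 1) 1).map (fun i =>
      PySem.List.slice t (some i) (some (i + n)))))

-- next((symbol for name, symbol in cleaned if name in substrings), None)
def pvGoB (subs : PySem.Set (List Char)) : List (String × String) → Option String
  | [] => none
  | (name, symbol) :: rest =>
    if PySem.Set.contains subs name.toList then some symbol
    else pvGoB subs rest

def extract_stock_symbol_from_title_alt (title : String) (mappings : List (String × String)) : Option String :=
  let cleaned := ((PySem.Dict.ofList mappings).items).map (fun p => (pvClean p.1, p.2))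
  pvGoB (pvSubstrings title.toList (pvLengths cleaned)) cleaned

-- ===== PRECONDITION & SPEC =====
def Spec_extract_stock_symbol_from_title (title : String) (mappings : List (String × String)) (out : Option String) : Prop := out = extract_stock_symbol_from_title_alt title mappings
instance (title : String) (mappings : List (String × String)) (out : Option String) : Decidable (Spec_extract_stock_symbol_from_title title mappings out) := by unfold Spec_extract_stock_symbol_from_title; infer_instance

-- ===== CLAIM (what is proved, stated in full; the proofs are below) =====
def Claim_equal_extract_stock_symbol_from_title : Prop := ∀ (title : String) (mappings : List (String × String)), Dom_extract_stock_symbol_from_title title mappings → Spec_extract_stock_symbol_from_title title mappings (extract_stock_symbol_from_title title mappings)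

-- ===== LEMMAS AND PROOFS =====

-- every element of the substring index is an infix of the title
theorem pvMem_substrings_infix (t : List Char) (L : PySem.Set Int)
    (hL : ∀ n ∈ L, (0:Int) ≤ n) (x : List Char)
    (hx : x ∈ pvSubstrings t L) : x <:+: t := by
  unfold pvSubstrings at hx
  rw [PySem.Set.mem_ofList] at hx
  rcases List.mem_flatMap.mp hx with ⟨n, hn, hx2⟩
  rcases List.mem_map.mp hx2 with ⟨i, hi, rfl⟩
  rcases PySem.List.mem_pyRange_one.mp hi with ⟨hi0, _⟩
  have hn0 : (0:Int) ≤ n := hL n hn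
  rw [PySem.List.slice_toNat t hi0 (by omega)]
  exact ((List.take_prefix _ _).isInfix).trans ((List.drop_suffix _ _).isInfix)

-- a string of an indexed length that occurs in the title is in the index
theorem pvIsIn_mem_substrings (t : List Char) (L : PySem.Set Int) (x : List Char)
    (hl : ((x.length : Int)) ∈ L) (hin : PySem.Chars.isIn x t = true) :
    x ∈ pvSubstrings t L := by
  unfold pvSubstrings
  rw [PySem.Set.mem_ofList]
  rcases (PySem.Chars.exists_prefix_drop_iff_isIn x t).mpr hin with ⟨j, hpre⟩
  have hxeq : x = (t.drop j).take x.length := List.prefix_iff_eq_take.mp hpre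
  have hlen : x.length ≤ t.length - j := by
    have := hpre.length_le
    simpa using this
  apply List.mem_flatMap.mpr
  refine ⟨(x.length : Int), hl, List.mem_map.mpr ?_⟩
  rcases Nat.eq_zero_or_pos x.length with h0 | hpos
  · -- empty string: position 0
    refine ⟨0, PySem.List.mem_pyRange_one.mpr ⟨le_refl _, by omega⟩, ?_⟩
    have hx0 : x = [] := List.eq_nil_of_length_eq_zero h0
    rw [show ((0:Int)) = ((0:Nat):Int) by norm_num,
        PySem.List.slice_natCast_add t 0 x.length]
    simp [hx0]
  · -- nonempty: it occurs at position j, and j + len ≤ len(title)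
    have hjle : j ≤ t.length := by
      by_contra hgt
      push Not at hgt
      rw [List.drop_eq_nil_of_le (by omega)] at hpre
      have := hpre.length_le
      simp at this
      omega
    refine ⟨(j : Int), PySem.List.mem_pyRange_one.mpr ⟨by omega, by omega⟩, ?_⟩
    rw [PySem.List.slice_natCast_add t j x.length]
    exact hxeq.symm

-- for a name whose length is indexed, the set lookup equals Python's 'in title'
theorem pvContains_eq_isIn (title : String) (L : PySem.Set Int)
    (hL : ∀ n ∈ L, (0:Int) ≤ n) (name : String)
    (hl : ((name.toList.length : Int)) ∈ L) :
    PySem.Set.contains (pvSubstrings title.toList L) name.toList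
      = PySem.Str.isIn name title := by
  rw [PySem.Str.isIn_eq]
  cases hin : PySem.Chars.isIn name.toList title.toList with
  | true =>
    have := pvIsIn_mem_substrings title.toList L name.toList hl hin
    simp [PySem.Set.contains]
    exact this
  | false =>
    have hninf := (PySem.Chars.isIn_eq_false_iff _ _).mp hin
    simp [PySem.Set.contains]
    intro hmem
    exact hninf (pvMem_substrings_infix title.toList L hL name.toList hmem)

-- the two loops agree whenever every lookup agrees with 'in title'
theorem pvGoB_map_clean (title : String) (subs : PySem.Set (List Char))
    (l : List (String × String))
    (h : ∀ p ∈ l, PySem.Set.contains subs (pvClean p.1).toList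
                    = PySem.Str.isIn (pvClean p.1) title) :
    pvGoB subs (l.map (fun p => (pvClean p.1, p.2))) = pvGoA title l := by
  induction l with
  | nil => rfl
  | cons a rest ih =>
    simp only [List.map_cons, pvGoB, pvGoA]
    rw [h a (by simp)]
    split_ifs
    · rfl
    · exact ih (fun p hp => h p (by simp [hp]))

-- lengths in the index are lengths of strings, hence nonnegative
theorem pvLengths_nonneg (cleaned : List (String × String)) :
    ∀ n ∈ pvLengths cleaned, (0:Int) ≤ n := by
  intro n hn
  unfold pvLengths at hn
  rw [PySem.Set.mem_ofList] at hn
  rcases List.mem_map.mp hn with ⟨p, _, rfl⟩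
  rw [PySem.Str.len_eq]
  positivity

-- ===== VERDICT (by name: the statement is the Claim_ definition above) =====
theorem extract_stock_symbol_from_title_spec : Claim_equal_extract_stock_symbol_from_title := by
  intro title mappings _
  show extract_stock_symbol_from_title title mappings = extract_stock_symbol_from_title_alt title mappings
  unfold extract_stock_symbol_from_title extract_stock_symbol_from_title_alt
  set items := (PySem.Dict.ofList mappings).items with hitems
  set cleaned := items.map (fun p => (pvClean p.1, p.2)) with hcleaned
  rw [← pvGoB_map_clean title (pvSubstrings title.toList (pvLengths cleaned)) items ?_]
  intro p hp
  apply pvContains_eq_isIn title (pvLengths cleaned) (pvLengths_nonneg cleaned)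
  unfold pvLengths
  rw [PySem.Set.mem_ofList]
  apply List.mem_map.mpr
  refine ⟨(pvClean p.1, p.2), List.mem_map.mpr ⟨p, hp, rfl⟩, ?_⟩
  rw [PySem.Str.len_eq]
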